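-- pv_equiv track=rewrite | github.com/ontology4ai/ontology | ontology-graph/core/ontology/csv_to_ontology_json.py | _build_tags_from_relations
-- ===== SOURCE A (Python) =====
-- from typing import Dict, List, Any, Optional
--
-- def _build_tags_from_relations(relations: List[Dict[str, Any]]) -> List[Dict[str, Any]]:
--     """从 link 的 op_name_source/op_name_target 派生 tag 列表。
--
--     rdf_services.py 的写库逻辑会用 tagName 去建立 ontology_link_type_tag 绑定，
--     所以 CSV 转换时必须保证：link 里出现的 op_name_* 在 tag.new/exist 中也出现。
--     """
--     tags_by_name: Dict[str, Dict[str, Any]] = {}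
--
--     def upsert(name: Optional[str], label: Optional[str]):
--         if not name:
--             return
--         if name not in tags_by_name:
--             tags_by_name[name] = {
--                 "tagName": name,
--                 "tagLabel": label or "",
--                 "tagDesc": None,
--             }
--         else:
--             # label 以非空优先（避免后续行覆盖掉已有中文）
--             if label and not tags_by_name[name].get("tagLabel"):
--                 tags_by_name[name]["tagLabel"] = label
--
--     for rel in relations:
--         upsert(rel.get("op_name_source"), rel.get("_op_label_source"))
--         upsert(rel.get("op_name_target"), rel.get("_op_label_target"))
--
--     return list(tags_by_name.values())
-- ===== SOURCE B (Python) =====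
-- from typing import Dict, List, Any, Optional
--
-- def _build_tags_from_relations(relations: List[Dict[str, Any]]) -> List[Dict[str, Any]]:
--     # Two-pass: collect every label per name (source first, in encounter order),
--     # then reduce each name's label list to its first truthy label.
--     labels_by_name: Dict[str, List[Optional[str]]] = {}
--     for rel in relations:
--         for name, label in (
--             (rel.get("op_name_source"), rel.get("_op_label_source")),
--             (rel.get("op_name_target"), rel.get("_op_label_target")),
--         ):
--             if name:
--                 labels_by_name.setdefault(name, []).append(label)
--     return [
--         {
--             "tagName": name,
--             "tagLabel": next((l for l in ls if l), ""),
--             "tagDesc": None,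
--         }
--         for name, ls in labels_by_name.items()
--     ]
-- ===== Notes on version B (the rewrite author's own statement) =====
-- stated objective: alternative
-- what changed: Replaces the single-pass upsert (create-or-conditionally-patch a record dict per endpoint) with a collect-then-reduce shape: one pass groups all endpoint labels per name in encounter order, a second pass builds each record with the first truthy label.
import Mathlib
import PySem

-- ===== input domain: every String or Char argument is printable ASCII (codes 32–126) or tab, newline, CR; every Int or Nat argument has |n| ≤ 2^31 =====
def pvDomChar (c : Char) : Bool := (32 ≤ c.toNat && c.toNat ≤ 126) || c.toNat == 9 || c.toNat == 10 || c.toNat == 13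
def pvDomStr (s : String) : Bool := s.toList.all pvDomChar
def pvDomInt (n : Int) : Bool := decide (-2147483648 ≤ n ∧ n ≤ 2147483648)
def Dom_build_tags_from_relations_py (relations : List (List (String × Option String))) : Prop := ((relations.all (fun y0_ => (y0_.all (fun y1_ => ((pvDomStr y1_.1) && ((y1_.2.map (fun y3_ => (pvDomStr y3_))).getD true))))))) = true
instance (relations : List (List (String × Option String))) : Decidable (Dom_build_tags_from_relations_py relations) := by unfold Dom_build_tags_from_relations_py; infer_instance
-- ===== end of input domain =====

-- B replaces A's single-pass upsert with a collect-labels-then-reduce two-pass shape (alternative decomposition, same cost).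

-- ===== PORT A =====
-- Python truthiness of an Optional[str]
def pvTruthy (o : Option String) : Bool :=
  match o with
  | none => false
  | some s => !(s == "")

-- `label or ""`
def pvLabelOr (label : Option String) : String :=
  match label with
  | none => ""
  | some l => if l == "" then "" else l

-- truthiness of `tags_by_name[name].get("tagLabel")` (an Optional value of the record dict)
def pvTruthy2 (o : Option (Option String)) : Bool :=
  match o with
  | some (some s) => !(s == "")
  | _ => false

-- the inner `upsert` helper of A
def pvUpsert (d : PySem.Dict String (PySem.Dict String (Option String)))
    (name label : Option String) : PySem.Dict String (PySem.Dict String (Option String)) :=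
  if !(pvTruthy name) then d
  else
    match name with
    | none => d  -- unreachable: pvTruthy none = false
    | some n =>
      match d.get? n with
      | none =>
        d.insert n (PySem.Dict.mk
          [("tagName", some n), ("tagLabel", some (pvLabelOr label)), ("tagDesc", none)])
      | some rcd =>
        if pvTruthy label && !(pvTruthy2 (rcd.get? "tagLabel")) then
          d.insert n (rcd.insert "tagLabel" label)
        else d

def build_tags_from_relations_py (relations : List (List (String × Option String))) : List (List (String × Option String)) :=
  let tags_by_name := relations.foldl
    (fun d rel =>
      let r := PySem.Dict.mk rel
      pvUpsert (pvUpsert d (r.getD "op_name_source" none) (r.getD "_op_label_source" none))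
        (r.getD "op_name_target" none) (r.getD "_op_label_target" none))
    PySem.Dict.empty
  tags_by_name.values.map PySem.Dict.items

-- ===== PORT B =====
-- `next((l for l in ls if l), "")`
def pvFirstTruthy (ls : List (Option String)) : String :=
  match ls with
  | [] => ""
  | none :: rest => pvFirstTruthy rest
  | some l :: rest => if l == "" then pvFirstTruthy rest else l

-- `labels_by_name.setdefault(name, []).append(label)` guarded by `if name:`
def pvPush (d : PySem.Dict String (List (Option String))) (name label : Option String) :
    PySem.Dict String (List (Option String)) :=
  match name with
  | none => d
  | some n => if n == "" then d else d.modify n [] (· ++ [label])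

def build_tags_from_relations_py_alt (relations : List (List (String × Option String))) : List (List (String × Option String)) :=
  let labels_by_name := relations.foldl
    (fun d rel =>
      let r := PySem.Dict.mk rel
      pvPush (pvPush d (r.getD "op_name_source" none) (r.getD "_op_label_source" none))
        (r.getD "op_name_target" none) (r.getD "_op_label_target" none))
    PySem.Dict.empty
  labels_by_name.items.map
    (fun p => [("tagName", some p.1), ("tagLabel", some (pvFirstTruthy p.2)), ("tagDesc", none)])

-- ===== PRECONDITION & SPEC =====
def Spec_build_tags_from_relations_py (relations : List (List (String × Option String))) (out : List (List (String × Option String))) : Prop := out = build_tags_from_relations_py_alt relations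
instance (relations : List (List (String × Option String))) (out : List (List (String × Option String))) : Decidable (Spec_build_tags_from_relations_py relations out) := by unfold Spec_build_tags_from_relations_py; infer_instance

-- ===== CLAIM (what is proved, stated in full; the proofs are below) =====
def Claim_equal_build_tags_from_relations_py : Prop := ∀ (relations : List (List (String × Option String))), Dom_build_tags_from_relations_py relations → Spec_build_tags_from_relations_py relations (build_tags_from_relations_py relations)

-- ===== LEMMAS AND PROOFS =====

-- the record A keeps for a name whose collected labels (B-side) are ls
def pvRec (n : String) (ls : List (Option String)) : PySem.Dict String (Option String) :=
  PySem.Dict.mk [("tagName", some n), ("tagLabel", some (pvFirstTruthy ls)), ("tagDesc", none)]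

-- A's dict as a function of B's dict
def pvToA (b : PySem.Dict String (List (Option String))) :
    PySem.Dict String (PySem.Dict String (Option String)) :=
  PySem.Dict.mk (b.items.map (fun p => (p.1, pvRec p.1 p.2)))

theorem pvFirstTruthy_append (ls : List (Option String)) (x : Option String) :
    pvFirstTruthy (ls ++ [x]) =
      if pvFirstTruthy ls == "" then pvLabelOr x else pvFirstTruthy ls := by
  induction ls with
  | nil =>
    cases x with
    | none => rfl
    | some l => by_cases h : l = "" <;> simp [pvFirstTruthy, pvLabelOr, h]
  | cons o rest ih =>
    cases o with
    | none => simpa [pvFirstTruthy] using ih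
    | some l =>
      by_cases h : l = "" <;> simp [pvFirstTruthy, h, ih]

theorem pvToA_get? (b : PySem.Dict String (List (Option String))) (n : String) :
    (pvToA b).get? n = (b.get? n).map (pvRec n) := by
  obtain ⟨l⟩ := b
  induction l with
  | nil => rfl
  | cons p rest ih =>
    simp only [pvToA, PySem.Dict.get?, List.map_cons, List.find?] at *
    by_cases h : p.1 == n
    · simp only [h]
      simp [pvRec, eq_of_beq h]
    · simp only [h] at *
      simpa [pvToA, PySem.Dict.items] using ih

theorem pvToA_contains (b : PySem.Dict String (List (Option String))) (n : String) :
    (pvToA b).contains n = b.contains n := by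
  simp [PySem.Dict.contains_eq_isSome_get?, pvToA_get?]

theorem pvNodup_insert_self {ν : Type} (d : PySem.Dict String ν) (k : String) (v : ν)
    (hnd : d.keys.Nodup) (h : d.get? k = some v) : d.insert k v = d := by
  have hc : d.contains k = true := by
    rw [PySem.Dict.contains_eq_isSome_get?, h]; rfl
  apply PySem.Dict.ext
  rw [PySem.Dict.items_insert_of_contains d v hc]
  conv_rhs => rw [← List.map_id d.items]
  apply List.map_congr_left
  intro p hp
  by_cases hpk : (p.1 == k) = true
  · have hk : p.1 = k := eq_of_beq hpk
    have := PySem.Dict.get?_of_mem_items (d := d) (k := p.1) (v := p.2) (by simpa using hp) hnd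
    rw [hk, h] at this
    have hv : v = p.2 := Option.some.inj this
    simp [Prod.ext_iff, hk, hv]
  · simp [hpk]

theorem pvToA_insert (b : PySem.Dict String (List (Option String))) (n : String)
    (v : List (Option String)) :
    pvToA (b.insert n v) = (pvToA b).insert n (pvRec n v) := by
  apply PySem.Dict.ext
  simp only [PySem.Dict.insert, pvToA_contains]
  by_cases hc : b.contains n = true
  · simp only [hc, if_true, pvToA, List.map_map]
    apply List.map_congr_left
    intro p _
    by_cases hpk : (p.1 == n) = true
    · simp [Function.comp, hpk]
    · simp [Function.comp, hpk]
  · simp [hc, pvToA]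

theorem pvFirstTruthy_single (x : Option String) : pvFirstTruthy [x] = pvLabelOr x := by
  cases x with
  | none => rfl
  | some l => by_cases h : l = "" <;> simp [pvFirstTruthy, pvLabelOr, h]

theorem pvToA_push (b : PySem.Dict String (List (Option String))) (name label : Option String)
    (hnd : b.keys.Nodup) :
    pvToA (pvPush b name label) = pvUpsert (pvToA b) name label := by
  cases name with
  | none => rfl
  | some n =>
    by_cases hn : n = ""
    · subst hn; rfl
    · have hbeq : (n == "") = false := by simp [hn]
      have hB : pvPush b (some n) label = b.insert n (b.getD n [] ++ [label]) := by
        simp [pvPush, hbeq, PySem.Dict.modify]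
      cases hget : b.get? n with
      | none =>
        have hA : pvUpsert (pvToA b) (some n) label =
            (pvToA b).insert n (PySem.Dict.mk
              [("tagName", some n), ("tagLabel", some (pvLabelOr label)), ("tagDesc", none)]) := by
          simp [pvUpsert, pvTruthy, hbeq, pvToA_get?, hget]
        have hgd : b.getD n [] = [] := by simp [PySem.Dict.getD, hget]
        rw [hA, hB, hgd, pvToA_insert]
        simp [pvRec, pvFirstTruthy_single]
      | some ls =>
        have hgd : b.getD n [] = ls := by simp [PySem.Dict.getD, hget]
        have hgetA : (pvToA b).get? n = some (pvRec n ls) := by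
          rw [pvToA_get?, hget]; rfl
        have htag : (pvRec n ls).get? "tagLabel" = some (some (pvFirstTruthy ls)) := by
          simp [pvRec, PySem.Dict.get?]
        have houter : (!(pvTruthy (some n))) = false := by simp [pvTruthy, hbeq]
        by_cases hcnd : (pvTruthy label && !(pvTruthy2 ((pvRec n ls).get? "tagLabel"))) = true
        · -- first truthy label arrives now: A patches the record in place
          have hc2 : pvTruthy label = true ∧ pvFirstTruthy ls = "" := by
            rw [htag] at hcnd
            simpa [pvTruthy2] using hcnd
          obtain ⟨l, hl, hlne⟩ : ∃ l, label = some l ∧ l ≠ "" := by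
            cases label with
            | none => simp [pvTruthy] at hc2
            | some l => exact ⟨l, rfl, by simpa [pvTruthy] using hc2.1⟩
          have hA : pvUpsert (pvToA b) (some n) label =
              (pvToA b).insert n ((pvRec n ls).insert "tagLabel" label) := by
            simp only [pvUpsert, houter, Bool.false_eq_true, if_false, hgetA]
            rw [if_pos hcnd]
          have hrcd : (pvRec n ls).insert "tagLabel" label = pvRec n (ls ++ [label]) := by
            simp [pvRec, PySem.Dict.insert, PySem.Dict.contains, pvFirstTruthy_append, hc2.2,
              hl, pvLabelOr, hlne]
          rw [hB, hgd, pvToA_insert, hA, hrcd]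
        · -- no patch: the appended label does not change the first truthy label
          have hA : pvUpsert (pvToA b) (some n) label = pvToA b := by
            simp only [pvUpsert, houter, Bool.false_eq_true, if_false, hgetA]
            rw [if_neg hcnd]
          have hrec : pvRec n (ls ++ [label]) = pvRec n ls := by
            rw [htag] at hcnd
            simp [pvTruthy2] at hcnd
            by_cases hft : pvFirstTruthy ls = ""
            · have hlab : pvLabelOr label = "" := by
                cases label with
                | none => rfl
                | some l =>
                  have hl0 : l = "" := by
                    by_contra hne
                    exact (hcnd (by simpa [pvTruthy] using hne)) hft
                  simp [pvLabelOr, hl0]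
              simp [pvRec, pvFirstTruthy_append, hft, hlab]
            · simp [pvRec, pvFirstTruthy_append, hft]
          have hkeys : (pvToA b).keys.Nodup := by
            have hk : (pvToA b).keys = b.keys := by
              simp [pvToA, PySem.Dict.keys, List.map_map, Function.comp]
            rw [hk]; exact hnd
          rw [hB, hgd, pvToA_insert, hrec, hA, pvNodup_insert_self (pvToA b) n (pvRec n ls) hkeys hgetA]

theorem pvPush_nodup (b : PySem.Dict String (List (Option String))) (name label : Option String)
    (hnd : b.keys.Nodup) : (pvPush b name label).keys.Nodup := by
  cases name with
  | none => exact hnd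
  | some n =>
    by_cases hn : (n == "") = true
    · simpa [pvPush, hn] using hnd
    · simpa [pvPush, hn, PySem.Dict.modify] using PySem.Dict.nodup_keys_insert _ _ _ hnd

theorem pvToA_fold (relations : List (List (String × Option String)))
    (b : PySem.Dict String (List (Option String))) (hnd : b.keys.Nodup) :
    pvToA (relations.foldl
      (fun d rel =>
        let r := PySem.Dict.mk rel
        pvPush (pvPush d (r.getD "op_name_source" none) (r.getD "_op_label_source" none))
          (r.getD "op_name_target" none) (r.getD "_op_label_target" none)) b)
    = relations.foldl
      (fun d rel =>
        let r := PySem.Dict.mk rel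
        pvUpsert (pvUpsert d (r.getD "op_name_source" none) (r.getD "_op_label_source" none))
          (r.getD "op_name_target" none) (r.getD "_op_label_target" none)) (pvToA b) := by
  induction relations generalizing b with
  | nil => rfl
  | cons rel rest ih =>
    simp only [List.foldl_cons]
    rw [ih _ (pvPush_nodup _ _ _ (pvPush_nodup _ _ _ hnd)),
      pvToA_push _ _ _ (pvPush_nodup _ _ _ hnd), pvToA_push _ _ _ hnd]

-- ===== VERDICT (by name: the statement is the Claim_ definition above) =====
theorem build_tags_from_relations_py_spec : Claim_equal_build_tags_from_relations_py := by
  intro relations _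
  unfold Spec_build_tags_from_relations_py build_tags_from_relations_py build_tags_from_relations_py_alt
  rw [show (PySem.Dict.empty : PySem.Dict String (PySem.Dict String (Option String))) = pvToA PySem.Dict.empty from rfl,
      ← pvToA_fold _ _ (by simp [PySem.Dict.keys, PySem.Dict.empty])]
  generalize (relations.foldl _ PySem.Dict.empty) = b
  simp [pvToA, PySem.Dict.values, pvRec, Function.comp]
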